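-- pv_equiv track=rewrite | github.com/erturkmemmedli/Leet-Code-Solutions | 1411_numOfWays.py | numOfWays
-- ===== SOURCE A (Python) =====
-- def numOfWays(n: int) -> int:
--     sameAtEdges, allDifferent = 24, 30
--     if n == 1: return 12
--     if n == 2: return sameAtEdges + allDifferent
--     for _ in range(n-2):
--        small = sameAtEdges // 2 + allDifferent * 2 // 5
--        big = sameAtEdges // 2 + allDifferent * 3 // 5
--        sameAtEdges = small * 4
--        allDifferent = big * 5
--     return (sameAtEdges + allDifferent) % 1000000007
-- ===== SOURCE B (Python) =====
-- def numOfWays(n: int) -> int: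
--     # State (u, v) = (sameAtEdges // 2, allDifferent // 5) follows the exact
--     # integer linear recurrence u' = 2u + 4v, v' = u + 3v from (12, 6);
--     # answer is (2u + 5v) mod 1e9+7.  Advance max(n-2, 0) steps at once by
--     # binary matrix exponentiation of M = [[2, 4], [1, 3]] modulo 1e9+7.
--     if n == 1:
--         return 12
--     MOD = 1000000007
--     e = n - 2 if n > 2 else 0
--     # R = identity, M = [[2,4],[1,3]]; R accumulates R * M^e (entries mod MOD)
--     a, b, c, d = 1, 0, 0, 1
--     x, y, z, w = 2, 4, 1, 3
--     while e > 0: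
--         if e & 1:
--             a, b, c, d = (a*x + b*z) % MOD, (a*y + b*w) % MOD, (c*x + d*z) % MOD, (c*y + d*w) % MOD
--         x, y, z, w = (x*x + y*z) % MOD, (x*y + y*w) % MOD, (z*x + w*z) % MOD, (z*y + w*w) % MOD
--         e >>= 1
--     u = (a*12 + b*6) % MOD
--     v = (c*12 + d*6) % MOD
--     return (2*u + 5*v) % MOD
-- ===== Notes on version B (the rewrite author's own statement) =====
-- stated objective: faster
-- what changed: Replaces A's per-row loop over exact (exponentially growing) integers with binary matrix exponentiation, modulo the problem's prime modulus, of the two-by-two recurrence matrix derived from A's invariant (sameAtEdges and allDifferent stay divisible by two resp. five).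
import Mathlib
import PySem

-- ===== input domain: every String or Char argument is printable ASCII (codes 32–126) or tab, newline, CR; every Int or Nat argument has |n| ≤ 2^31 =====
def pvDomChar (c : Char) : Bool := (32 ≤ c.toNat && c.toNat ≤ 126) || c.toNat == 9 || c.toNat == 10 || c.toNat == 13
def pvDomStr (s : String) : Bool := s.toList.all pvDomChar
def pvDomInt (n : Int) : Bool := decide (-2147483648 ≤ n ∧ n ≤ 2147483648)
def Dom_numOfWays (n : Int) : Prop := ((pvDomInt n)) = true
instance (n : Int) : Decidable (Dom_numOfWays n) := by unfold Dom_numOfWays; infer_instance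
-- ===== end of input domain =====

-- B replaces A's O(n) loop on exact integers by O(log n) modular 2x2 matrix exponentiation
-- of the same recurrence; return values agree on every integer input.

-- ===== PORT A =====
-- one iteration of A's for-body (Python // ported as PySem.Int.floordiv)
def stepA (sd : Int × Int) : Int × Int :=
  let small := PySem.Int.floordiv sd.1 2 + PySem.Int.floordiv (sd.2 * 2) 5
  let big := PySem.Int.floordiv sd.1 2 + PySem.Int.floordiv (sd.2 * 3) 5
  (small * 4, big * 5)

-- `for _ in range(n-2)` : iterate the body (n-2).toNat times (range is empty for n-2 ≤ 0)
def loopA : Nat → (Int × Int) → (Int × Int)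
  | 0, sd => sd
  | k + 1, sd => loopA k (stepA sd)

def numOfWays (n : Int) : Int :=
  if n = 1 then 12
  else if n = 2 then 24 + 30
  else
    let sd := loopA (n - 2).toNat (24, 30)
    PySem.Int.mod (sd.1 + sd.2) 1000000007

-- ===== PORT B =====
-- 2x2 integer matrix ⟨a b; c d⟩ held as Source B's four scalars
structure Mat where
  a : Int
  b : Int
  c : Int
  d : Int
deriving DecidableEq, Repr

-- Source B's product-mod-MOD update (both the `if e & 1` line and the squaring line are this)
def mulModB (R M : Mat) : Mat :=
  ⟨PySem.Int.mod (R.a * M.a + R.b * M.c) 1000000007,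
   PySem.Int.mod (R.a * M.b + R.b * M.d) 1000000007,
   PySem.Int.mod (R.c * M.a + R.d * M.c) 1000000007,
   PySem.Int.mod (R.c * M.b + R.d * M.d) 1000000007⟩

-- Source B's `while e > 0` loop: e & 1 = e % 2, e >>= 1 = e / 2 (e is nonnegative)
def pbLoop (e : Nat) (R M : Mat) : Mat :=
  if h : e = 0 then R
  else pbLoop (e / 2) (if e % 2 = 1 then mulModB R M else R) (mulModB M M)
termination_by e
decreasing_by exact Nat.div_lt_self (Nat.pos_of_ne_zero h) (by norm_num)

def numOfWays_alt (n : Int) : Int :=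
  if n = 1 then 12
  else
    -- e = n - 2 if n > 2 else 0 (nonnegative, so .toNat is exact)
    let e : Nat := (if n > 2 then n - 2 else 0).toNat
    let R := pbLoop e ⟨1, 0, 0, 1⟩ ⟨2, 4, 1, 3⟩
    let u := PySem.Int.mod (R.a * 12 + R.b * 6) 1000000007
    let v := PySem.Int.mod (R.c * 12 + R.d * 6) 1000000007
    PySem.Int.mod (2 * u + 5 * v) 1000000007

-- ===== PRECONDITION & SPEC =====
def Spec_numOfWays (n : Int) (out : Int) : Prop := out = numOfWays_alt n
instance (n : Int) (out : Int) : Decidable (Spec_numOfWays n out) := by unfold Spec_numOfWays; infer_instance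

-- ===== CLAIM (what is proved, stated in full; the proofs are below) =====
def Claim_equal_numOfWays : Prop := ∀ (n : Int), Dom_numOfWays n → Spec_numOfWays n (numOfWays n)

-- ===== LEMMAS AND PROOFS =====

-- exact (unreduced) 2x2 matrix product
def mulE (A B : Mat) : Mat :=
  ⟨A.a * B.a + A.b * B.c, A.a * B.b + A.b * B.d,
   A.c * B.a + A.d * B.c, A.c * B.b + A.d * B.d⟩

-- exact right powers
def mpow (M : Mat) : Nat → Mat
  | 0 => ⟨1, 0, 0, 1⟩
  | k + 1 => mulE (mpow M k) M

-- entrywise congruence mod 1000000007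
def MEq (A B : Mat) : Prop :=
  Int.ModEq 1000000007 A.a B.a ∧ Int.ModEq 1000000007 A.b B.b ∧
  Int.ModEq 1000000007 A.c B.c ∧ Int.ModEq 1000000007 A.d B.d

-- exact iterate of A's linear map on the halved/fifthed state
def itL : Nat → (Int × Int) → (Int × Int)
  | 0, uv => uv
  | k + 1, uv => itL k (2 * uv.1 + 4 * uv.2, uv.1 + 3 * uv.2)

lemma mulE_assoc (A B C : Mat) : mulE (mulE A B) C = mulE A (mulE B C) := by
  simp only [mulE, Mat.mk.injEq]
  refine ⟨by ring, by ring, by ring, by ring⟩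

lemma mpow_succ_left (M : Mat) (k : Nat) : mulE M (mpow M k) = mpow M (k + 1) := by
  induction k with
  | zero => simp [mpow, mulE]
  | succ k ih =>
      calc mulE M (mpow M (k + 1)) = mulE M (mulE (mpow M k) M) := rfl
        _ = mulE (mulE M (mpow M k)) M := (mulE_assoc _ _ _).symm
        _ = mulE (mpow M (k + 1)) M := by rw [ih]
        _ = mpow M (k + 1 + 1) := rfl

lemma mpow_sq (M : Mat) (k : Nat) : mpow (mulE M M) k = mpow M (2 * k) := by
  induction k with
  | zero => rfl
  | succ k ih =>
      rw [mpow, ih, show 2 * (k + 1) = 2 * k + 1 + 1 from by ring, ← mulE_assoc]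
      rfl

lemma MEq.refl (A : Mat) : MEq A A :=
  ⟨Int.ModEq.refl _, Int.ModEq.refl _, Int.ModEq.refl _, Int.ModEq.refl _⟩

lemma MEq.trans {A B C : Mat} (h1 : MEq A B) (h2 : MEq B C) : MEq A C :=
  ⟨h1.1.trans h2.1, h1.2.1.trans h2.2.1, h1.2.2.1.trans h2.2.2.1, h1.2.2.2.trans h2.2.2.2⟩

lemma MEq.mulE {A A' B B' : Mat} (h1 : MEq A A') (h2 : MEq B B') :
    MEq (mulE A B) (mulE A' B') := by
  obtain ⟨ha, hb, hc, hd⟩ := h1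
  obtain ⟨ha', hb', hc', hd'⟩ := h2
  exact ⟨(ha.mul ha').add (hb.mul hc'), (ha.mul hb').add (hb.mul hd'),
         (hc.mul ha').add (hd.mul hc'), (hc.mul hb').add (hd.mul hd')⟩

lemma mod_modeq (x : Int) : Int.ModEq 1000000007 (PySem.Int.mod x 1000000007) x := by
  rw [PySem.Int.mod_eq_emod_of_pos (by norm_num)]
  exact Int.emod_emod_of_dvd x dvd_rfl

lemma mulModB_modeq (A B : Mat) : MEq (mulModB A B) (mulE A B) :=
  ⟨mod_modeq _, mod_modeq _, mod_modeq _, mod_modeq _⟩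

lemma pbLoop_modeq : ∀ (e : Nat) (R M Rx Mx : Mat), MEq R Rx → MEq M Mx →
    MEq (pbLoop e R M) (mulE Rx (mpow Mx e)) := by
  intro e
  induction e using Nat.strong_induction_on with
  | _ e ih =>
    intro R M Rx Mx hR hM
    by_cases h : e = 0
    · subst h
      rw [pbLoop, dif_pos rfl, show mulE Rx (mpow Mx 0) = Rx from by simp [mpow, mulE]]
      exact hR
    · rw [pbLoop, dif_neg h]
      have hlt : e / 2 < e := Nat.div_lt_self (Nat.pos_of_ne_zero h) (by norm_num)
      have hRx' : MEq (if e % 2 = 1 then mulModB R M else R)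
          (if e % 2 = 1 then mulE Rx Mx else Rx) := by
        by_cases hp : e % 2 = 1
        · rw [if_pos hp, if_pos hp]
          exact (mulModB_modeq R M).trans (hR.mulE hM)
        · rw [if_neg hp, if_neg hp]; exact hR
      have hMx' : MEq (mulModB M M) (mulE Mx Mx) :=
        (mulModB_modeq M M).trans (hM.mulE hM)
      refine (ih (e / 2) hlt _ _ _ _ hRx' hMx').trans ?_
      rw [mpow_sq]
      by_cases hp : e % 2 = 1
      · rw [if_pos hp, mulE_assoc, mpow_succ_left, show 2 * (e / 2) + 1 = e from by omega]
        exact MEq.refl _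
      · rw [if_neg hp, show 2 * (e / 2) = e from by omega]
        exact MEq.refl _

-- A's loop preserves the invariant (2 ∣ s, 5 ∣ d) and acts as the exact linear map itL
lemma loopA_exact : ∀ (k : Nat) (u v : Int),
    loopA k (2 * u, 5 * v) = (2 * (itL k (u, v)).1, 5 * (itL k (u, v)).2) := by
  intro k
  induction k with
  | zero => intro u v; rfl
  | succ k ih =>
      intro u v
      have hs : stepA (2 * u, 5 * v) = (2 * (2 * u + 4 * v), 5 * (u + 3 * v)) := by
        simp only [stepA]
        have h2 : PySem.Int.floordiv (2 * u) 2 = u := by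
          rw [PySem.Int.floordiv_eq_ediv_of_pos (by norm_num)]
          exact Int.mul_ediv_cancel_left u (by norm_num)
        have h5a : PySem.Int.floordiv (5 * v * 2) 5 = 2 * v := by
          rw [PySem.Int.floordiv_eq_ediv_of_pos (by norm_num),
              show (5 : Int) * v * 2 = 5 * (2 * v) from by ring]
          exact Int.mul_ediv_cancel_left _ (by norm_num)
        have h5b : PySem.Int.floordiv (5 * v * 3) 5 = 3 * v := by
          rw [PySem.Int.floordiv_eq_ediv_of_pos (by norm_num),
              show (5 : Int) * v * 3 = 5 * (3 * v) from by ring]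
          exact Int.mul_ediv_cancel_left _ (by norm_num)
        simp only [h2, h5a, h5b, Prod.mk.injEq]
        exact ⟨by ring, by ring⟩
      rw [loopA, hs, ih, itL]

-- the iterate is the matrix power applied to the start vector
lemma itL_mpow : ∀ (k : Nat) (u v : Int),
    itL k (u, v) = ((mpow ⟨2, 4, 1, 3⟩ k).a * u + (mpow ⟨2, 4, 1, 3⟩ k).b * v,
                    (mpow ⟨2, 4, 1, 3⟩ k).c * u + (mpow ⟨2, 4, 1, 3⟩ k).d * v) := by
  intro k
  induction k with
  | zero => intro u v; simp [itL, mpow]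
  | succ k ih =>
      intro u v
      rw [itL, ih, mpow]
      simp only [mulE, Prod.mk.injEq]
      constructor <;> ring

-- both programs agree on the shared loop count k
lemma core_eq (k : Nat) :
    PySem.Int.mod ((loopA k (24, 30)).1 + (loopA k (24, 30)).2) 1000000007 =
    PySem.Int.mod
      (2 * PySem.Int.mod ((pbLoop k ⟨1, 0, 0, 1⟩ ⟨2, 4, 1, 3⟩).a * 12 +
                          (pbLoop k ⟨1, 0, 0, 1⟩ ⟨2, 4, 1, 3⟩).b * 6) 1000000007 +
       5 * PySem.Int.mod ((pbLoop k ⟨1, 0, 0, 1⟩ ⟨2, 4, 1, 3⟩).c * 12 +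
                          (pbLoop k ⟨1, 0, 0, 1⟩ ⟨2, 4, 1, 3⟩).d * 6) 1000000007) 1000000007 := by
  have hA : loopA k (24, 30) = (2 * (itL k (12, 6)).1, 5 * (itL k (12, 6)).2) := by
    have := loopA_exact k 12 6
    norm_num at this ⊢
    exact this
  set P := mpow ⟨2, 4, 1, 3⟩ k with hP
  have hit : itL k (12, 6) = (P.a * 12 + P.b * 6, P.c * 12 + P.d * 6) := itL_mpow k 12 6
  set R := pbLoop k ⟨1, 0, 0, 1⟩ ⟨2, 4, 1, 3⟩ with hRdef
  have hpb : MEq R P := by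
    refine (pbLoop_modeq k ⟨1, 0, 0, 1⟩ ⟨2, 4, 1, 3⟩ ⟨1, 0, 0, 1⟩ ⟨2, 4, 1, 3⟩
      (MEq.refl _) (MEq.refl _)).trans ?_
    rw [show mulE ⟨1, 0, 0, 1⟩ P = P from by simp [mulE]]
    exact MEq.refl _
  obtain ⟨ha, hb, hc, hd⟩ := hpb
  have hu : Int.ModEq 1000000007 (PySem.Int.mod (R.a * 12 + R.b * 6) 1000000007)
      (P.a * 12 + P.b * 6) :=
    (mod_modeq _).trans ((ha.mul_right 12).add (hb.mul_right 6))
  have hv : Int.ModEq 1000000007 (PySem.Int.mod (R.c * 12 + R.d * 6) 1000000007)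
      (P.c * 12 + P.d * 6) :=
    (mod_modeq _).trans ((hc.mul_right 12).add (hd.mul_right 6))
  have hsum : Int.ModEq 1000000007
      (2 * PySem.Int.mod (R.a * 12 + R.b * 6) 1000000007 +
       5 * PySem.Int.mod (R.c * 12 + R.d * 6) 1000000007)
      ((loopA k (24, 30)).1 + (loopA k (24, 30)).2) := by
    rw [hA, hit]
    exact (hu.mul_left 2).add (hv.mul_left 5)
  rw [PySem.Int.mod_eq_emod_of_pos (a := (loopA k (24, 30)).1 + (loopA k (24, 30)).2)
        (by norm_num),
      PySem.Int.mod_eq_emod_of_pos (by norm_num)]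
  exact hsum.symm

-- ===== VERDICT (by name: the statement is the Claim_ definition above) =====
theorem numOfWays_spec : Claim_equal_numOfWays := by
  intro n _
  show numOfWays n = numOfWays_alt n
  by_cases h1 : n = 1
  · simp [numOfWays, numOfWays_alt, h1]
  by_cases h2 : n = 2
  · subst h2
    have hc := core_eq 0
    rw [show PySem.Int.mod ((loopA 0 (24, 30)).1 + (loopA 0 (24, 30)).2) 1000000007 =
          24 + 30 from by decide] at hc
    simp only [numOfWays, numOfWays_alt, if_neg h1]
    rw [show ((if (2 : Int) > 2 then (2 : Int) - 2 else 0)).toNat = 0 from by norm_num]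
    exact hc
  · simp only [numOfWays, numOfWays_alt, if_neg h1, if_neg h2]
    rw [show ((if n > 2 then n - 2 else 0)).toNat = (n - 2).toNat from by
          split_ifs with h <;> omega]
    exact core_eq (n - 2).toNat
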